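-- pv_equiv track=rewrite | github.com/pypi-data/pypi-mirror-321 | packages/webcode-tk/webcode_tk-1.2.0.tar.gz/webcode_tk-1.2.0/webcode_tk/animation_tools.py | get_targetted_properties_msg
-- ===== SOURCE A (Python) =====
-- def get_targetted_properties_msg(
--     properties, properties_targetted, current_file
-- ):
--     properties = list(properties)
--     for property in properties_targetted:
--         if property in properties:
--             properties.remove(property)
--     if properties:
--         # we failed to include all required properties
--         msg = f"fail: {current_file}'s animations did not target all "
--         msg += f"required properties (missing {properties})"
--     else:
--         # Success on the required properties
--         msg = f"pass: {current_file}'s animations targetted all "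
--         msg += "required properties"
--     return msg
-- ===== SOURCE B (Python) =====
-- def get_targetted_properties_msg(properties, properties_targetted, current_file):
--     counts = {}
--     for p in properties_targetted:
--         counts[p] = counts.get(p, 0) + 1
--     remaining = []
--     for p in properties:
--         c = counts.get(p, 0)
--         if c:
--             counts[p] = c - 1
--         else:
--             remaining.append(p)
--     if remaining:
--         return (f"fail: {current_file}'s animations did not target all "
--                 f"required properties (missing {remaining})")
--     return (f"pass: {current_file}'s animations targetted all "
--             "required properties")
-- ===== Notes on version B (the rewrite author's own statement) =====
-- stated objective: faster
-- what changed: Replaces the remove-loop (a membership test plus list.remove scan per targetted property) by a count table of properties_targetted built once and a single order-preserving pass over properties that consumes counts, then builds the identical pass/fail message.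
import Mathlib
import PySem

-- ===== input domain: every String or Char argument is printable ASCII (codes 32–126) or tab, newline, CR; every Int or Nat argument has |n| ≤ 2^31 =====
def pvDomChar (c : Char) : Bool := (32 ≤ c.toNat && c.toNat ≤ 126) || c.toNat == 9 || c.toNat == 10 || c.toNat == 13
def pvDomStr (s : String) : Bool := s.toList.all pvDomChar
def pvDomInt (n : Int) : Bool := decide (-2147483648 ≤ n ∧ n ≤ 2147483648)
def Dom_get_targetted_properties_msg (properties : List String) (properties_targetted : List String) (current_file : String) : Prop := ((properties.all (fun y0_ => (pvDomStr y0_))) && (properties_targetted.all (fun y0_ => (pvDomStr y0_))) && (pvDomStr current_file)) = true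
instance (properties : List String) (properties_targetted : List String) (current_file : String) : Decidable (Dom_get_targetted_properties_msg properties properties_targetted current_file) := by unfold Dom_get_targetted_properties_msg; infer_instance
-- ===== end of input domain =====

-- B replaces A's repeated in-test + list.remove passes by a count table built once and a single
-- order-preserving pass over properties (objective: alternative decomposition; same message text).


-- ===== PORT A =====
-- shared f-string helper: Python repr of a str (exact on the printable-ASCII + tab/newline/CR domain)
def pyReprStr (s : String) : String :=
  let cs := s.toList
  let q : Char := if '\'' ∈ cs ∧ ¬ ('"' ∈ cs) then '"' else '\''
  let body := cs.foldl (fun acc c =>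
    acc ++ (if c = '\\' then "\\\\"
      else if c = q then String.ofList ['\\', q]
      else if c = '\t' then "\\t"
      else if c = '\n' then "\\n"
      else if c = '\r' then "\\r"
      else String.ofList [c])) ""
  String.ofList [q] ++ body ++ String.ofList [q]

-- shared f-string helper: Python repr of a list of str
def pyReprStrList (l : List String) : String :=
  "[" ++ PySem.Str.join ", " (l.map pyReprStr) ++ "]"

def get_targetted_properties_msg (properties : List String) (properties_targetted : List String) (current_file : String) : String :=
  let props := properties_targetted.foldl
    (fun ps property => if ps.contains property then ps.erase property else ps) properties
  if props ≠ [] then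
    let msg := "fail: " ++ current_file ++ "'s animations did not target all "
    msg ++ ("required properties (missing " ++ pyReprStrList props ++ ")")
  else
    let msg := "pass: " ++ current_file ++ "'s animations targetted all "
    msg ++ "required properties"

-- ===== PORT B =====
def get_targetted_properties_msg_alt (properties : List String) (properties_targetted : List String) (current_file : String) : String :=
  let counts := properties_targetted.foldl
    (fun d p => d.insert p (d.getD p 0 + 1)) (PySem.Dict.empty : PySem.Dict String Int)
  let st := properties.foldl
    (fun (s : PySem.Dict String Int × List String) p =>
      let c := s.1.getD p 0
      if c ≠ 0 then (s.1.insert p (c - 1), s.2) else (s.1, s.2 ++ [p]))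
    (counts, [])
  let remaining := st.2
  if remaining ≠ [] then
    "fail: " ++ current_file ++ "'s animations did not target all " ++
      ("required properties (missing " ++ pyReprStrList remaining ++ ")")
  else
    "pass: " ++ current_file ++ "'s animations targetted all " ++ "required properties"

-- ===== PRECONDITION & SPEC =====
def Spec_get_targetted_properties_msg (properties : List String) (properties_targetted : List String) (current_file : String) (out : String) : Prop := out = get_targetted_properties_msg_alt properties properties_targetted current_file
instance (properties : List String) (properties_targetted : List String) (current_file : String) (out : String) : Decidable (Spec_get_targetted_properties_msg properties properties_targetted current_file out) := by unfold Spec_get_targetted_properties_msg; infer_instance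

-- ===== CLAIM (what is proved, stated in full; the proofs are below) =====
def Claim_equal_get_targetted_properties_msg : Prop := ∀ (properties : List String) (properties_targetted : List String) (current_file : String), Dom_get_targetted_properties_msg properties properties_targetted current_file → Spec_get_targetted_properties_msg properties properties_targetted current_file (get_targetted_properties_msg properties properties_targetted current_file)

-- ===== LEMMAS AND PROOFS =====

-- A's loop is exactly List.diff
lemma aFold_eq_diff (ts ps : List String) :
    ts.foldl (fun ps property => if ps.contains property then ps.erase property else ps) ps
      = ps.diff ts := by
  induction ts generalizing ps with
  | nil => simp [List.diff]
  | cons t ts ih =>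
    simp only [List.foldl_cons, List.diff_cons]
    by_cases h : t ∈ ps
    · rw [if_pos (by simpa using h)]
      exact ih _
    · rw [if_neg (by simpa using h), List.erase_of_not_mem h]
      exact ih _

-- B's pass computes List.diff, given a dict holding the multiset of ts as counts
lemma bFold_eq_diff (ps : List String) (d : PySem.Dict String Int) (ts acc : List String)
    (h : ∀ v, d.getD v 0 = (ts.count v : Int)) :
    (ps.foldl
      (fun (s : PySem.Dict String Int × List String) p =>
        let c := s.1.getD p 0
        if c ≠ 0 then (s.1.insert p (c - 1), s.2) else (s.1, s.2 ++ [p]))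
      (d, acc)).2 = acc ++ ps.diff ts := by
  induction ps generalizing d ts acc with
  | nil => rw [List.foldl_nil, List.nil_diff, List.append_nil]
  | cons p ps ih =>
    rw [List.foldl_cons]
    by_cases hc : d.getD p 0 ≠ 0
    · have hmem : p ∈ ts := by
        by_contra hmem
        exact hc (by rw [h p, List.count_eq_zero.mpr hmem]; rfl)
      have hcnt : 1 ≤ ts.count p := List.one_le_count_iff.mpr hmem
      have hstep : (let c := (d, acc).1.getD p 0
          if c ≠ 0 then ((d, acc).1.insert p (c - 1), (d, acc).2)
          else ((d, acc).1, (d, acc).2 ++ [p]))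
          = (d.insert p (d.getD p 0 - 1), acc) := by
        show (if d.getD p 0 ≠ 0 then (d.insert p (d.getD p 0 - 1), acc) else (d, acc ++ [p])) = _
        rw [if_pos hc]
      rw [hstep, ih (d.insert p (d.getD p 0 - 1)) (ts.erase p) acc ?_,
          List.cons_diff_of_mem hmem]
      intro v
      rw [PySem.Dict.getD_insert]
      by_cases hv : v = p
      · subst hv
        rw [if_pos rfl, h v, List.count_erase_self]
        push_cast [hcnt]
        ring
      · rw [if_neg hv, h v, List.count_erase_of_ne hv]
    · have hmem : p ∉ ts := by
        intro hmem
        have := h p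
        have h1 : 1 ≤ ts.count p := List.one_le_count_iff.mpr hmem
        omega
      have hstep : (let c := (d, acc).1.getD p 0
          if c ≠ 0 then ((d, acc).1.insert p (c - 1), (d, acc).2)
          else ((d, acc).1, (d, acc).2 ++ [p]))
          = (d, acc ++ [p]) := by
        show (if d.getD p 0 ≠ 0 then (d.insert p (d.getD p 0 - 1), acc) else (d, acc ++ [p])) = _
        rw [if_neg hc]
      rw [hstep, ih d ts (acc ++ [p]) h, List.cons_diff_of_not_mem hmem]
      simp

-- the initial dict of B holds the counts of properties_targetted
lemma counts_spec (ts : List String) (v : String) :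
    (ts.foldl (fun d p => d.insert p (d.getD p 0 + 1))
      (PySem.Dict.empty : PySem.Dict String Int)).getD v 0 = (ts.count v : Int) := by
  rw [PySem.Dict.getD_foldl_insert_add_one, PySem.Dict.getD_empty]
  simp

-- ===== VERDICT (by name: the statement is the Claim_ definition above) =====
theorem get_targetted_properties_msg_spec : Claim_equal_get_targetted_properties_msg := by
  intro properties properties_targetted current_file _
  show _ = _
  have hb := bFold_eq_diff properties
    (properties_targetted.foldl (fun d p => d.insert p (d.getD p 0 + 1)) PySem.Dict.empty)
    properties_targetted [] (counts_spec properties_targetted)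
  simp only [get_targetted_properties_msg, get_targetted_properties_msg_alt, aFold_eq_diff, hb,
    List.nil_append]
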